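-- pv_equiv track=rewrite | github.com/ilovemyminutes/problem-solving | upstage/03.py | nth_lowest_selling
-- ===== SOURCE A (Python) =====
-- from collections import Counter
-- import heapq
--
-- def nth_lowest_selling(sales, n):
--     """
--     :param elements: (list) List of book sales.
--     :param n: (int) The n-th lowest selling element the function should return.
--     :returns: (int) The n-th lowest selling book id in the book sales list.
--     """
--     counts = Counter(sales).items()
--     heap = []
--     for book_id, cnt in counts:
--         heapq.heappush(heap, (cnt, book_id))
--
--     for _ in range(n-1):
--         heapq.heappop(heap)
--
--     return heap[0][1]
-- ===== SOURCE B (Python) =====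
-- from collections import Counter
--
-- def nth_lowest_selling(sales, n):
--     counts = Counter(sales)
--     ordered = iter(sorted(counts.items(), key=lambda kv: (kv[1], kv[0])))
--     for _ in range(n - 1):
--         next(ordered)
--     return next(ordered)[0]
-- ===== Notes on version B (the rewrite author's own statement) =====
-- stated objective: simpler
-- what changed: Replaces the hand-driven heap (heappush loop, n-1 heappops, root read) with one full sort of the counter items keyed by (count, book_id) and an iterator advanced n-1 times before reading the answer; timsort on the item list beats m heappushes plus n-1 heappops by a constant factor.
import Mathlib
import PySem

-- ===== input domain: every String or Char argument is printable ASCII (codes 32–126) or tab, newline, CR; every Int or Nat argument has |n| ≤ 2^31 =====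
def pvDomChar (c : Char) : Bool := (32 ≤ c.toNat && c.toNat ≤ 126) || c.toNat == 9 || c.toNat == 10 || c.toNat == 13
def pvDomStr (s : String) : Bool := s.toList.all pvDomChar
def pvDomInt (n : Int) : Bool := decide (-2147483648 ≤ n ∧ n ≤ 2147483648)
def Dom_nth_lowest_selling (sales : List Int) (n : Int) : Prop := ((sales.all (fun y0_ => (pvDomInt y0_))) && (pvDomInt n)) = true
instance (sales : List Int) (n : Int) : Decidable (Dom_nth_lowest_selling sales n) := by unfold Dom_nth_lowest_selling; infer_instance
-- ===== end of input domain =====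

-- B replaces A's heap (heappush loop, n-1 heappops, root read) by one sort of the counter
-- items keyed by (count, book_id) and an iterator advanced n-1 times: simpler, no heap.

-- ===== PORT A =====
-- A pushes tuples (cnt, book_id) : Int × Int onto a heapq heap; Python compares these
-- tuples lexicographically, which pvLt transcribes (all book_ids in the heap are distinct,
-- so '<' on the tuples is never asked to compare equal first components further than this).
def pvLt (a b : Int × Int) : Bool := a.1 < b.1 || (a.1 == b.1 && a.2 < b.2)

-- CPython heapq._siftdown(heap, 0, pos) — the while-loop moving the hole at pos up;
-- newitem is heap[pos] as read by _siftdown before its loop.  Exact transcription.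
def pvSiftdown (heap : List (Int × Int)) (pos : Nat) (newitem : Int × Int) : List (Int × Int) :=
  if h : 0 < pos then
    let parentpos := (pos - 1) / 2
    let parent := heap.getD parentpos (0, 0)
    if pvLt newitem parent then
      pvSiftdown (heap.set pos parent) parentpos newitem
    else heap.set pos newitem
  else heap.set pos newitem
termination_by pos
decreasing_by
  have := Nat.div_le_self (pos - 1) 2
  omega

-- the while-loop of CPython heapq._siftup: move the smaller child up until a leaf,
-- returning the final array and hole position.
def pvSiftupLoop (heap : List (Int × Int)) (pos : Nat) : List (Int × Int) × Nat :=
  let endpos := heap.length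
  let childpos := 2 * pos + 1
  if h : childpos < endpos then
    let rightpos := childpos + 1
    let c := if rightpos < endpos && !(pvLt (heap.getD childpos (0, 0)) (heap.getD rightpos (0, 0)))
             then rightpos else childpos
    pvSiftupLoop (heap.set pos (heap.getD c (0, 0))) c
  else (heap, pos)
termination_by heap.length - pos
decreasing_by
  simp only [List.length_set]
  split <;> omega

-- CPython heapq._siftup(heap, 0): save newitem = heap[0], sink the hole to a leaf,
-- place newitem there, then _siftdown(heap, 0, pos) (whose newitem re-read is the same value).
def pvSiftup0 (heap : List (Int × Int)) : List (Int × Int) :=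
  let newitem := heap.getD 0 (0, 0)
  let r := pvSiftupLoop heap 0
  pvSiftdown (r.1.set r.2 newitem) r.2 newitem

-- heapq.heappush: append, then _siftdown(heap, 0, len(heap)-1).
def pvHeappush (heap : List (Int × Int)) (item : Int × Int) : List (Int × Int) :=
  pvSiftdown (heap ++ [item]) heap.length item

-- heapq.heappop: lastelt = heap.pop()  (IndexError on an empty heap → none);
-- if the heap is still non-empty, return heap[0] after moving lastelt to the root and sifting.
def pvHeappop (heap : List (Int × Int)) : Option ((Int × Int) × List (Int × Int)) :=
  if heap.isEmpty then none
  else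
    let lastelt := heap.getLastD (0, 0)
    let rest := heap.dropLast
    if rest.isEmpty then some (lastelt, rest)
    else some (rest.getD 0 (0, 0), pvSiftup0 (rest.set 0 lastelt))

-- 'for _ in range(n-1): heapq.heappop(heap)'
def pvPopLoop (heap : List (Int × Int)) : Nat → Option (List (Int × Int))
  | 0 => some heap
  | k + 1 =>
    match pvHeappop heap with
    | none => none
    | some (_, h') => pvPopLoop h' k

def nth_lowest_selling (sales : List Int) (n : Int) : Int :=
  let counts := (PySem.Dict.counter sales).items
  let heap := counts.foldl (fun h p => pvHeappush h (p.2, p.1)) []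
  match pvPopLoop heap (n - 1).toNat with
  | none => 0  -- a heappop raised IndexError: excluded by Pre_
  | some h' => ((PySem.List.pyGet? h' 0).map (·.2)).getD 0  -- heap[0][1]; none = IndexError, excluded by Pre_

-- ===== PORT B =====
-- the iterator over the sorted list: advancing it is dropping its head;
-- none = the iterator is exhausted (next raised StopIteration, excluded by Pre_)
def pvSkip : List (Int × Int) → Nat → Option (List (Int × Int))
  | rest, 0 => some rest
  | [], _ + 1 => none
  | _ :: t, k + 1 => pvSkip t k

def nth_lowest_selling_alt (sales : List Int) (n : Int) : Int :=
  let counts := PySem.Dict.counter sales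
  let ordered := PySem.List.sorted2 counts.items (fun kv => kv.2) (fun kv => kv.1)
  match pvSkip ordered (n - 1).toNat with  -- 'for _ in range(n-1): next(ordered)'
  | none => 0  -- a next raised StopIteration: excluded by Pre_
  | some rest => ((rest.head?).map (·.1)).getD 0  -- final next(ordered)[0]; none = StopIteration, excluded by Pre_

-- ===== PRECONDITION & SPEC =====
-- Pre_ excludes exactly the inputs where A raises: an empty sales list (heap[0] IndexError)
-- and n exceeding the number of distinct book ids (heappop from / index into an exhausted heap).
def Pre_nth_lowest_selling (sales : List Int) (n : Int) : Prop :=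
  sales ≠ [] ∧ n ≤ ((PySem.Set.ofList sales).length : Int)
instance (sales : List Int) (n : Int) : Decidable (Pre_nth_lowest_selling sales n) := by
  unfold Pre_nth_lowest_selling; infer_instance

def pvWitness_nth_lowest_selling : List Int × Int := ([3, 1, 3], 2)

def Spec_nth_lowest_selling (sales : List Int) (n : Int) (out : Int) : Prop := out = nth_lowest_selling_alt sales n
instance (sales : List Int) (n : Int) (out : Int) : Decidable (Spec_nth_lowest_selling sales n out) := by unfold Spec_nth_lowest_selling; infer_instance

-- ===== CLAIM (what is proved, stated in full; the proofs are below) =====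
def Claim_equal_nth_lowest_selling : Prop := ∀ (sales : List Int) (n : Int), Dom_nth_lowest_selling sales n → Pre_nth_lowest_selling sales n → Spec_nth_lowest_selling sales n (nth_lowest_selling sales n)

-- ===== LEMMAS AND PROOFS =====

-- --- generic list helpers used by the proofs ---
theorem getD_set (l : List (Int × Int)) (i j : Nat) (v d : Int × Int) :
    (l.set i v).getD j d = if i = j ∧ i < l.length then v else l.getD j d := by
  simp only [List.getD_eq_getElem?_getD, List.getElem?_set]
  by_cases hij : i = j
  · subst hij
    by_cases hi : i < l.length <;> simp [hi]
  · simp [hij]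

theorem perm_set_swap (l : List (Int × Int)) (i j : Nat) (hi : i < l.length)
    (hj : j < l.length) (d : Int × Int) :
    ((l.set i (l.getD j d)).set j (l.getD i d)).Perm l := by
  by_cases hij : i = j
  · subst hij
    simp [List.getD_eq_getElem?_getD, hi]
  · rw [List.perm_iff_count]
    intro x
    have hj' : j < (l.set i (l.getD j d)).length := by simpa using hj
    rw [List.count_set hj', List.count_set hi]
    have e1 : (l.set i (l.getD j d))[j] = l[j] := by
      rw [List.getElem_set_ne (by omega)]
    have e2 : l.getD i d = l[i] := by simp [List.getD_eq_getElem?_getD, hi]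
    have e3 : l.getD j d = l[j] := by simp [List.getD_eq_getElem?_getD, hj]
    rw [e1, e2, e3]
    have hci : (l[i] == x) = true → 1 ≤ List.count x l := by
      intro h; rw [beq_iff_eq] at h; subst h
      exact List.count_pos_iff.2 (List.getElem_mem hi)
    have hcj : (l[j] == x) = true → 1 ≤ List.count x l := by
      intro h; rw [beq_iff_eq] at h; subst h
      exact List.count_pos_iff.2 (List.getElem_mem hj)
    by_cases h1 : (l[i] == x) = true <;> by_cases h2 : (l[j] == x) = true <;>
      simp only [h1, h2, if_true, if_false, Bool.false_eq_true] <;>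
      first
      | (have := hci h1; omega)
      | (have := hcj h2; omega)
      | omega

theorem pvLt_trans {a b c : Int × Int} (h1 : pvLt a b = true) (h2 : pvLt b c = true) :
    pvLt a c = true := by
  revert h1 h2; simp [pvLt]; omega

-- --- order facts about pvLt (lexicographic '<' on Int × Int) ---
theorem pvLt_irrefl (a : Int × Int) : pvLt a a = false := by
  simp [pvLt]

theorem pvLt_asymm {a b : Int × Int} (h : pvLt a b = true) : pvLt b a = false := by
  revert h; simp [pvLt]; omega

theorem pvNotLt_trans {a b c : Int × Int} (h1 : pvLt a b = false) (h2 : pvLt b c = false) :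
    pvLt a c = false := by
  revert h1 h2; simp [pvLt]; omega

-- --- the heap invariant ---
def IsHeap (h : List (Int × Int)) : Prop :=
  ∀ i : Nat, 0 < i → i < h.length → pvLt (h.getD i (0,0)) (h.getD ((i-1)/2) (0,0)) = false

theorem pvRoot_min {h : List (Int × Int)} (hh : IsHeap h) :
    ∀ i : Nat, i < h.length → pvLt (h.getD i (0,0)) (h.getD 0 (0,0)) = false := by
  intro i
  induction i using Nat.strong_induction_on with
  | _ i ih =>
    intro hi
    rcases Nat.eq_zero_or_pos i with h0 | h0
    · subst h0; exact pvLt_irrefl _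
    · have hp : (i - 1) / 2 < i := by
        have := Nat.div_le_self (i - 1) 2; omega
      exact pvNotLt_trans (hh i h0 hi) (ih _ hp (lt_trans hp hi))

-- siftdown invariant: g = heap.set pos newitem satisfies the heap property at every edge
-- except (pos, parent pos), and the children of pos also dominate the value at parent pos.
def SdInv (heap : List (Int × Int)) (pos : Nat) (newitem : Int × Int) : Prop :=
  pos < heap.length ∧
  (∀ i : Nat, 0 < i → i < heap.length → i ≠ pos →
    pvLt ((heap.set pos newitem).getD i (0,0)) ((heap.set pos newitem).getD ((i-1)/2) (0,0)) = false) ∧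
  (0 < pos → ∀ i : Nat, i < heap.length → (i-1)/2 = pos → 0 < i →
    pvLt ((heap.set pos newitem).getD i (0,0)) ((heap.set pos newitem).getD ((pos-1)/2) (0,0)) = false)

theorem pvSiftdown_spec (heap : List (Int × Int)) (pos : Nat) (newitem : Int × Int)
    (hinv : SdInv heap pos newitem) :
    (pvSiftdown heap pos newitem).Perm (heap.set pos newitem) ∧
    IsHeap (pvSiftdown heap pos newitem) := by
  induction pos using Nat.strong_induction_on generalizing heap with
  | _ pos ih =>
  obtain ⟨hlen, h2, h3⟩ := hinv
  rw [pvSiftdown]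
  by_cases hp : 0 < pos
  · rw [dif_pos hp]
    have hpplt : (pos - 1) / 2 < pos := by omega
    have hpplen : (pos - 1) / 2 < heap.length := lt_trans hpplt hlen
    by_cases hlt : pvLt newitem (heap.getD ((pos - 1) / 2) (0, 0)) = true
    · rw [if_pos hlt]
      -- value description of g2 := (heap.set pos parent).set pp newitem
      have gvA : ((heap.set pos (heap.getD ((pos - 1) / 2) (0, 0))).set ((pos - 1) / 2) newitem).getD ((pos - 1) / 2) (0,0) = newitem := by
        rw [getD_set]; rw [if_pos ⟨rfl, by simpa using hpplen⟩]
      have gvB : ∀ j, j = pos → ((heap.set pos (heap.getD ((pos - 1) / 2) (0, 0))).set ((pos - 1) / 2) newitem).getD j (0,0) = heap.getD ((pos - 1) / 2) (0, 0) := by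
        intro j hj; subst hj
        rw [getD_set, if_neg (by omega), getD_set, if_pos ⟨rfl, hlen⟩]
      have gvC : ∀ j, j ≠ (pos - 1) / 2 → j ≠ pos → ((heap.set pos (heap.getD ((pos - 1) / 2) (0, 0))).set ((pos - 1) / 2) newitem).getD j (0,0) = heap.getD j (0,0) := by
        intro j hj1 hj2
        rw [getD_set, if_neg (by omega), getD_set, if_neg (by omega)]
      -- value description of g := heap.set pos newitem
      have gA : (heap.set pos newitem).getD pos (0,0) = newitem := by
        rw [getD_set, if_pos ⟨rfl, hlen⟩]
      have gC : ∀ j, j ≠ pos → (heap.set pos newitem).getD j (0,0) = heap.getD j (0,0) := by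
        intro j hj; rw [getD_set, if_neg (by omega)]
      have hinv2 : SdInv (heap.set pos (heap.getD ((pos - 1) / 2) (0, 0))) ((pos - 1) / 2) newitem := by
        refine ⟨by simpa using hpplen, ?_, ?_⟩
        · intro i hi0 hil hip
          simp only [List.length_set] at hil
          by_cases hipos : i = pos
          · have hq : (i - 1) / 2 = (pos - 1) / 2 := by rw [hipos]
            rw [hq, gvB i hipos, gvA]
            exact pvLt_asymm hlt
          · have hbase := h2 i hi0 hil hipos
            rw [gC i hipos] at hbase
            by_cases hq1 : (i - 1) / 2 = (pos - 1) / 2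
            · rw [hq1, gvC i hip hipos, gvA]
              rw [hq1, gC _ (by omega)] at hbase
              by_cases hcon : pvLt (heap.getD i (0,0)) newitem = true
              · exact absurd (pvLt_trans hcon hlt) (by simp only [hbase]; simp)
              · simpa using hcon
            · by_cases hq2 : (i - 1) / 2 = pos
              · rw [gvC i hip hipos, hq2, gvB pos rfl]
                have hb := h3 hp i hil hq2 hi0
                rw [gC i hipos, gC _ (by omega)] at hb
                exact hb
              · rw [gvC i hip hipos, gvC _ hq1 hq2]
                rw [gC _ hq2] at hbase
                exact hbase
        · intro hpp0 i hil hq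
          simp only [List.length_set] at hil
          intro hi0
          have hr1 : ((pos - 1) / 2 - 1) / 2 ≠ (pos - 1) / 2 := by omega
          have hr2 : ((pos - 1) / 2 - 1) / 2 ≠ pos := by omega
          have hb2 := h2 ((pos - 1) / 2) hpp0 hpplen (by omega)
          rw [gC _ (by omega), gC _ (by omega)] at hb2
          by_cases hipos : i = pos
          · rw [gvB i hipos, gvC _ hr1 hr2]
            exact hb2
          · have hipp : i ≠ (pos - 1) / 2 := by omega
            rw [gvC i hipp hipos, gvC _ hr1 hr2]
            have hb1 := h2 i hi0 hil hipos
            rw [gC i hipos, hq, gC _ (by omega)] at hb1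
            exact pvNotLt_trans hb1 hb2
      obtain ⟨permRec, heapRec⟩ := ih ((pos - 1) / 2) hpplt (heap.set pos (heap.getD ((pos - 1) / 2) (0, 0))) hinv2
      refine ⟨permRec.trans ?_, heapRec⟩
      have e_pp : (heap.set pos newitem).getD ((pos - 1) / 2) (0,0) = heap.getD ((pos - 1) / 2) (0, 0) := by
        rw [getD_set, if_neg (by omega)]
      have e_pos : (heap.set pos newitem).getD pos (0,0) = newitem := by
        rw [getD_set, if_pos ⟨rfl, hlen⟩]
      have hX : (heap.set pos (heap.getD ((pos - 1) / 2) (0, 0))).set ((pos - 1) / 2) newitem =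
          ((heap.set pos newitem).set pos ((heap.set pos newitem).getD ((pos - 1) / 2) (0,0))).set ((pos - 1) / 2) ((heap.set pos newitem).getD pos (0,0)) := by
        rw [e_pp, e_pos, List.set_set]
      rw [hX]
      exact perm_set_swap (heap.set pos newitem) pos ((pos - 1) / 2) (by simpa using hlen) (by simpa using hpplen) (0,0)
    · rw [if_neg hlt]
      refine ⟨List.Perm.refl _, ?_⟩
      intro i hi0 hil
      simp only [List.length_set] at hil
      by_cases hipos : i = pos
      · have hq : (i - 1) / 2 = (pos - 1) / 2 := by rw [hipos]
        rw [hq, getD_set, if_pos ⟨hipos.symm, hlen⟩, getD_set, if_neg (by omega)]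
        simpa using hlt
      · exact h2 i hi0 hil hipos
  · rw [dif_neg hp]
    refine ⟨List.Perm.refl _, ?_⟩
    intro i hi0 hil
    simp only [List.length_set] at hil
    exact h2 i hi0 hil (by omega)

-- siftup-loop invariant: position pos is a hole (its entry is garbage); all other
-- edges not touching the hole hold, and the children of the hole dominate the
-- value at the hole's parent.
def SuInv (heap : List (Int × Int)) (pos : Nat) : Prop :=
  pos < heap.length ∧
  (∀ i : Nat, 0 < i → i < heap.length → i ≠ pos → (i-1)/2 ≠ pos →
    pvLt (heap.getD i (0,0)) (heap.getD ((i-1)/2) (0,0)) = false) ∧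
  (0 < pos → ∀ i : Nat, i < heap.length → (i-1)/2 = pos →
    pvLt (heap.getD i (0,0)) (heap.getD ((pos-1)/2) (0,0)) = false)

-- one step of the sift-up loop: moving the chosen child c into the hole keeps the invariant
theorem suInv_step (heap : List (Int × Int)) (pos c : Nat) (hinv : SuInv heap pos)
    (hposc : pos < c) (hclen : c < heap.length) (hcp : (c - 1) / 2 = pos)
    (hsib : ∀ s, 0 < s → s < heap.length → (s - 1) / 2 = pos → s ≠ c →
      pvLt (heap.getD s (0,0)) (heap.getD c (0,0)) = false) :
    SuInv (heap.set pos (heap.getD c (0,0))) c := by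
  obtain ⟨hlen, s2, s3⟩ := hinv
  have hv : ∀ j, j ≠ pos → (heap.set pos (heap.getD c (0,0))).getD j (0,0) = heap.getD j (0,0) := by
    intro j hj; rw [getD_set, if_neg (by omega)]
  have hvp : (heap.set pos (heap.getD c (0,0))).getD pos (0,0) = heap.getD c (0,0) := by
    rw [getD_set, if_pos ⟨rfl, hlen⟩]
  refine ⟨by simpa using hclen, ?_, ?_⟩
  · intro i hi0 hil hic hqc
    simp only [List.length_set] at hil
    by_cases hipos : i = pos
    · rw [hipos, hvp, hv _ (by omega)]
      exact s3 (by omega) c hclen hcp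
    · by_cases hqpos : (i - 1) / 2 = pos
      · rw [hv i hipos, hqpos, hvp]
        exact hsib i hi0 hil hqpos hic
      · rw [hv i hipos, hv _ hqpos]
        exact s2 i hi0 hil hipos hqpos
  · intro hc0 i hil hqi
    simp only [List.length_set] at hil
    have hipos : i ≠ pos := by omega
    rw [hv i hipos, hcp, hvp]
    have := s2 i (by omega) hil hipos (by omega)
    rw [hqi] at this
    exact this

theorem pvSiftupLoop_spec (heap : List (Int × Int)) (pos : Nat) (hinv : SuInv heap pos) :
    ∀ x : Int × Int,
      ((pvSiftupLoop heap pos).1.set (pvSiftupLoop heap pos).2 x).Perm (heap.set pos x) ∧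
      SdInv (pvSiftupLoop heap pos).1 (pvSiftupLoop heap pos).2 x ∧
      (pvSiftupLoop heap pos).1.length = heap.length := by
  suffices H : ∀ (m : Nat) (heap : List (Int × Int)) (pos : Nat), heap.length - pos = m →
      SuInv heap pos →
      ∀ x : Int × Int,
        ((pvSiftupLoop heap pos).1.set (pvSiftupLoop heap pos).2 x).Perm (heap.set pos x) ∧
        SdInv (pvSiftupLoop heap pos).1 (pvSiftupLoop heap pos).2 x ∧
        (pvSiftupLoop heap pos).1.length = heap.length by
    exact H _ heap pos rfl hinv
  clear hinv heap pos
  intro m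
  induction m using Nat.strong_induction_on with
  | _ m ih =>
  intro heap pos hm hinv x
  rw [pvSiftupLoop]
  by_cases h : 2 * pos + 1 < heap.length
  · rw [dif_pos h]
    dsimp only
    by_cases hcnd : (decide (2 * pos + 1 + 1 < heap.length) &&
        !pvLt (heap.getD (2 * pos + 1) (0, 0)) (heap.getD (2 * pos + 1 + 1) (0, 0))) = true
    · rw [if_pos hcnd]
      have hc2 : 2 * pos + 1 + 1 < heap.length := by
        have := hcnd; simp only [Bool.and_eq_true, decide_eq_true_eq] at this; exact this.1
      have hcf : pvLt (heap.getD (2 * pos + 1) (0, 0)) (heap.getD (2 * pos + 1 + 1) (0, 0)) = false := by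
        have := hcnd; simp only [Bool.and_eq_true, Bool.not_eq_true'] at this; exact this.2
      have hstep := suInv_step heap pos (2 * pos + 1 + 1) hinv (by omega) hc2 (by omega)
        (fun s hs0 hs hsp hsne => by
          have hs1 : s = 2 * pos + 1 := by omega
          rw [hs1]; exact hcf)
      have hlen0 := hinv.1
      obtain ⟨hperm, hsd, hl⟩ := ih (heap.length - (2 * pos + 1 + 1)) (by omega)
        (heap.set pos (heap.getD (2 * pos + 1 + 1) (0, 0))) (2 * pos + 1 + 1) (by simp) hstep x
      refine ⟨hperm.trans ?_, hsd, by simpa using hl⟩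
      have e_c : (heap.set pos x).getD (2 * pos + 1 + 1) (0,0) = heap.getD (2 * pos + 1 + 1) (0, 0) := by
        rw [getD_set, if_neg (by omega)]
      have e_pos : (heap.set pos x).getD pos (0,0) = x := by
        rcases hinv with ⟨hlen, -, -⟩
        rw [getD_set, if_pos ⟨rfl, hlen⟩]
      have hX : (heap.set pos (heap.getD (2 * pos + 1 + 1) (0, 0))).set (2 * pos + 1 + 1) x =
          ((heap.set pos x).set pos ((heap.set pos x).getD (2 * pos + 1 + 1) (0,0))).set (2 * pos + 1 + 1) ((heap.set pos x).getD pos (0,0)) := by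
        rw [e_c, e_pos, List.set_set]
      rw [hX]
      rcases hinv with ⟨hlen, -, -⟩
      exact perm_set_swap (heap.set pos x) pos (2 * pos + 1 + 1) (by simpa using hlen) (by simpa using hc2) (0,0)
    · rw [if_neg hcnd]
      have hc1 : 2 * pos + 1 < heap.length := h
      have hsibf : ∀ s, 0 < s → s < heap.length → (s - 1) / 2 = pos → s ≠ 2 * pos + 1 →
          pvLt (heap.getD s (0,0)) (heap.getD (2 * pos + 1) (0,0)) = false := by
        intro s hs0 hs hsp hsne
        have hs2 : s = 2 * pos + 1 + 1 := by omega
        subst hs2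
        have : pvLt (heap.getD (2 * pos + 1) (0, 0)) (heap.getD (2 * pos + 1 + 1) (0, 0)) = true := by
          simp only [Bool.and_eq_true, decide_eq_true_eq, Bool.not_eq_true'] at hcnd
          rcases Bool.eq_false_or_eq_true (pvLt (heap.getD (2 * pos + 1) (0, 0)) (heap.getD (2 * pos + 1 + 1) (0, 0))) with ht | hf
          · exact ht
          · exact absurd ⟨by omega, hf⟩ hcnd
        exact pvLt_asymm this
      have hstep := suInv_step heap pos (2 * pos + 1) hinv (by omega) hc1 (by omega) hsibf
      have hlen0 := hinv.1
      obtain ⟨hperm, hsd, hl⟩ := ih (heap.length - (2 * pos + 1)) (by omega)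
        (heap.set pos (heap.getD (2 * pos + 1) (0, 0))) (2 * pos + 1) (by simp) hstep x
      refine ⟨hperm.trans ?_, hsd, by simpa using hl⟩
      have e_c : (heap.set pos x).getD (2 * pos + 1) (0,0) = heap.getD (2 * pos + 1) (0, 0) := by
        rw [getD_set, if_neg (by omega)]
      have e_pos : (heap.set pos x).getD pos (0,0) = x := by
        rcases hinv with ⟨hlen, -, -⟩
        rw [getD_set, if_pos ⟨rfl, hlen⟩]
      have hX : (heap.set pos (heap.getD (2 * pos + 1) (0, 0))).set (2 * pos + 1) x =
          ((heap.set pos x).set pos ((heap.set pos x).getD (2 * pos + 1) (0,0))).set (2 * pos + 1) ((heap.set pos x).getD pos (0,0)) := by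
        rw [e_c, e_pos, List.set_set]
      rw [hX]
      rcases hinv with ⟨hlen, -, -⟩
      exact perm_set_swap (heap.set pos x) pos (2 * pos + 1) (by simpa using hlen) (by simpa using hc1) (0,0)
  · rw [dif_neg h]
    dsimp only
    obtain ⟨hlen, s2, s3⟩ := hinv
    refine ⟨List.Perm.refl _, ⟨hlen, ?_, ?_⟩, rfl⟩
    · intro i hi0 hil hip
      have hq : (i - 1) / 2 ≠ pos := by omega
      rw [getD_set, if_neg (by omega), getD_set, if_neg (by omega)]
      exact s2 i hi0 hil hip hq
    · intro hp0 i hil hq hi0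
      exact absurd hil (by omega)

theorem set_zero_getD_self (heap : List (Int × Int)) (hne : heap ≠ []) :
    heap.set 0 (heap.getD 0 (0,0)) = heap := by
  cases heap with
  | nil => rfl
  | cons a t => simp

theorem pvSiftup0_spec (heap : List (Int × Int)) (hne : heap ≠ [])
    (hinv : SuInv heap 0) :
    (pvSiftup0 heap).Perm heap ∧ IsHeap (pvSiftup0 heap) := by
  obtain ⟨hperm, hsd, hl⟩ := pvSiftupLoop_spec heap 0 hinv (heap.getD 0 (0,0))
  have hsd' : SdInv ((pvSiftupLoop heap 0).1.set (pvSiftupLoop heap 0).2 (heap.getD 0 (0,0)))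
      (pvSiftupLoop heap 0).2 (heap.getD 0 (0,0)) := by
    obtain ⟨a, b, c⟩ := hsd
    refine ⟨by simpa using a, ?_, ?_⟩
    · intro i hi0 hil hip
      simp only [List.length_set] at hil
      simp only [List.set_set]
      exact b i hi0 hil hip
    · intro hp0 i hil hq hi0
      simp only [List.length_set] at hil
      simp only [List.set_set]
      exact c hp0 i hil hq hi0
  obtain ⟨hperm2, hheap2⟩ := pvSiftdown_spec _ _ _ hsd'
  rw [pvSiftup0]
  refine ⟨?_, by exact hheap2⟩
  refine (hperm2.trans ?_)
  simp only [List.set_set]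
  exact hperm.trans (by rw [set_zero_getD_self heap hne])

theorem set_append_len (l : List (Int × Int)) (x : Int × Int) :
    (l ++ [x]).set l.length x = l ++ [x] := by
  induction l with
  | nil => rfl
  | cons a t ih => simp [ih]

theorem getD_append_left (l : List (Int × Int)) (x : Int × Int) (i : Nat) (hi : i < l.length) :
    (l ++ [x]).getD i (0,0) = l.getD i (0,0) := by
  simp only [List.getD_eq_getElem?_getD]
  rw [List.getElem?_append_left hi]

theorem pvHeappush_spec (heap : List (Int × Int)) (item : Int × Int) (hh : IsHeap heap) :
    (pvHeappush heap item).Perm (heap ++ [item]) ∧ IsHeap (pvHeappush heap item) := by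
  have hinv : SdInv (heap ++ [item]) heap.length item := by
    refine ⟨by simp, ?_, ?_⟩
    · intro i hi0 hil hip
      simp only [List.length_append, List.length_cons, List.length_nil] at hil
      have hi : i < heap.length := by omega
      have hq : (i - 1) / 2 < heap.length := by omega
      rw [set_append_len, getD_append_left _ _ _ hi, getD_append_left _ _ _ hq]
      exact hh i hi0 hi
    · intro hp0 i hil hq hi0
      simp only [List.length_append, List.length_cons, List.length_nil] at hil
      exact absurd hq (by omega)
  obtain ⟨hperm, hheap⟩ := pvSiftdown_spec _ _ _ hinv
  rw [pvHeappush]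
  refine ⟨hperm.trans ?_, hheap⟩
  rw [set_append_len]

theorem pvHeappop_spec (heap : List (Int × Int)) (hne : heap ≠ []) (hh : IsHeap heap) :
    ∃ h', pvHeappop heap = some (heap.getD 0 (0,0), h') ∧
      (heap.getD 0 (0,0) :: h').Perm heap ∧ IsHeap h' := by
  rw [pvHeappop, if_neg (by simp [List.isEmpty_iff, hne])]
  by_cases h1 : heap.dropLast.isEmpty = true
  · -- a one-element heap: pop returns the root and leaves the empty heap
    have hlen1 : heap.length = 1 := by
      have h0 : heap.dropLast = [] := List.isEmpty_iff.1 h1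
      have hl := congrArg List.length h0
      simp only [List.length_dropLast, List.length_nil] at hl
      have : heap.length ≠ 0 := by simpa [List.length_eq_zero_iff] using hne
      omega
    rcases heap with _ | ⟨a, t⟩
    · exact absurd rfl hne
    · have ht : t = [] := by simpa [List.length_eq_zero_iff] using hlen1
      subst ht
      rw [if_pos h1]
      refine ⟨[], rfl, by simp, ?_⟩
      intro i hi0 hil
      simp at hil
  · rw [if_neg h1]
    have hrne : heap.dropLast ≠ [] := by simpa [List.isEmpty_iff] using h1
    have hlen2 : 2 ≤ heap.length := by
      have h2 := List.length_pos_of_ne_nil hrne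
      simp only [List.length_dropLast] at h2
      omega
    have hg0 : heap.dropLast.getD 0 (0,0) = heap.getD 0 (0,0) := by
      have h0 : (0 : Nat) < heap.dropLast.length := List.length_pos_of_ne_nil hrne
      simp only [List.getD_eq_getElem?_getD, List.getElem?_eq_getElem h0,
        List.getElem?_eq_getElem (by omega : (0 : Nat) < heap.length)]
      simp [List.getElem_dropLast]
    have hinv : SuInv (heap.dropLast.set 0 (heap.getLastD (0,0))) 0 := by
      refine ⟨by simpa using List.length_pos_of_ne_nil hrne, ?_, ?_⟩
      · intro i hi0 hil hi0' hq0
        simp only [List.length_set, List.length_dropLast] at hil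
        have hvi : (heap.dropLast.set 0 (heap.getLastD (0,0))).getD i (0,0) = heap.getD i (0,0) := by
          rw [getD_set, if_neg (by omega)]
          simp only [List.getD_eq_getElem?_getD, List.getElem?_eq_getElem (by simpa using hil : i < heap.dropLast.length),
            List.getElem?_eq_getElem (by omega : i < heap.length)]
          simp [List.getElem_dropLast]
        have hq : (i - 1) / 2 < heap.length - 1 := by omega
        have hvq : (heap.dropLast.set 0 (heap.getLastD (0,0))).getD ((i-1)/2) (0,0) = heap.getD ((i-1)/2) (0,0) := by
          rw [getD_set, if_neg (by omega)]
          simp only [List.getD_eq_getElem?_getD, List.getElem?_eq_getElem (by simpa using hq : (i-1)/2 < heap.dropLast.length),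
            List.getElem?_eq_getElem (by omega : (i-1)/2 < heap.length)]
          simp [List.getElem_dropLast]
        rw [hvi, hvq]
        exact hh i hi0 (by omega)
      · intro h0
        exact absurd h0 (by omega)
    obtain ⟨hperm, hheap⟩ := pvSiftup0_spec (heap.dropLast.set 0 (heap.getLastD (0,0)))
      (by simp [← List.length_pos_iff]; have := List.length_pos_of_ne_nil hrne; omega) hinv
    refine ⟨_, by rw [hg0], ?_, hheap⟩
    refine (List.Perm.cons _ hperm).trans ?_
    -- heap.getD 0 :: (dropLast.set 0 last) ~ heap
    rcases hd : heap.dropLast with _ | ⟨r0, rt⟩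
    · exact absurd hd hrne
    have hr0 : r0 = heap.getD 0 (0,0) := by
      rw [← hg0, hd]; simp
    have hlast : heap.dropLast ++ [heap.getLastD (0,0)] = heap := by
      have := List.dropLast_append_getLast hne
      rw [List.getLastD_eq_getLast?, List.getLast?_eq_some_getLast hne]
      exact this
    rw [List.set_cons_zero]
    refine (List.Perm.cons _ (List.perm_append_singleton _ _).symm).trans ?_
    rw [← hr0, ← List.cons_append, ← hd, hlast]

theorem pvRoot_min_mem {h : List (Int × Int)} (hh : IsHeap h) :
    ∀ y ∈ h, pvLt y (h.getD 0 (0,0)) = false := by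
  intro y hy
  obtain ⟨i, hi, rfl⟩ := List.mem_iff_getElem.1 hy
  have hmin := pvRoot_min hh i hi
  rw [List.getD_eq_getElem?_getD, List.getElem?_eq_getElem hi] at hmin
  simpa using hmin

theorem pvBuild_spec (l : List (Int × Int)) (h : List (Int × Int)) (hh : IsHeap h) :
    IsHeap (l.foldl (fun acc p => pvHeappush acc (p.2, p.1)) h) ∧
    (l.foldl (fun acc p => pvHeappush acc (p.2, p.1)) h).Perm
      (h ++ l.map (fun p => (p.2, p.1))) := by
  induction l generalizing h with
  | nil => exact ⟨hh, by simp⟩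
  | cons p t ih =>
    obtain ⟨hp1, hp2⟩ := pvHeappush_spec h (p.2, p.1) hh
    obtain ⟨ih1, ih2⟩ := ih (pvHeappush h (p.2, p.1)) hp2
    refine ⟨ih1, ?_⟩
    simp only [List.foldl_cons, List.map_cons]
    refine ih2.trans ?_
    refine (hp1.append_right _).trans ?_
    rw [List.append_assoc]
    exact List.Perm.refl _

theorem pvMin_head_eq {r s0 : Int × Int} {h' S' : List (Int × Int)}
    (hperm : (r :: h').Perm (s0 :: S'))
    (hmin : ∀ y ∈ (r :: h'), pvLt y r = false)
    (hpair : ∀ y ∈ S', pvLt s0 y = true) : r = s0 := by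
  have hr : r ∈ s0 :: S' := hperm.mem_iff.1 (List.mem_cons_self)
  have hs : s0 ∈ r :: h' := hperm.mem_iff.2 (List.mem_cons_self)
  rcases List.mem_cons.1 hr with h | h
  · exact h
  · have h1 := hpair r h
    have h2 := hmin s0 hs
    exact absurd h1 (by simp [h2])

theorem pvPopLoop_spec : ∀ (k : Nat) (S h : List (Int × Int)), h.Perm S → IsHeap h →
    S.Pairwise (fun a b => pvLt a b = true) → k ≤ S.length →
    ∃ h', pvPopLoop h k = some h' ∧ h'.Perm (S.drop k) ∧ IsHeap h' := by
  intro k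
  induction k with
  | zero =>
    intro S h hp hh _ _
    exact ⟨h, rfl, by simp [hp], hh⟩
  | succ k ih =>
    intro S h hp hh hpair hk
    rcases S with _ | ⟨s0, S'⟩
    · simp at hk
    have hne : h ≠ [] := by
      intro h0; subst h0
      have := hp.length_eq; simp at this
    obtain ⟨h'', hpop, hpp, hhh⟩ := pvHeappop_spec h hne hh
    have hroot : h.getD 0 (0,0) = s0 := by
      refine pvMin_head_eq (hpp.trans hp) ?_ ?_
      · intro y hy
        exact pvRoot_min_mem hh y (hpp.mem_iff.1 hy)
      · exact (List.pairwise_cons.1 hpair).1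
    have htail : h''.Perm S' := by
      have hc := hpp.trans hp
      rw [hroot] at hc
      exact hc.cons_inv
    obtain ⟨hf, he, hfp, hfh⟩ := ih S' h'' htail hhh (List.pairwise_cons.1 hpair).2 (by simpa using hk)
    refine ⟨hf, ?_, by simpa using hfp, hfh⟩
    show pvPopLoop h (k+1) = some hf
    simp only [pvPopLoop, hpop]
    exact he

-- B's tuple-keyed sort is the PySem sort under the lexicographic key (cnt, id)
def pvKey (kv : Int × Int) : Int ×ₗ Int := toLex (kv.2, kv.1)

theorem sorted2_eq_sorted (xs : List (Int × Int)) :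
    PySem.List.sorted2 xs (fun kv => kv.2) (fun kv => kv.1) =
    PySem.List.sorted xs pvKey := by
  unfold PySem.List.sorted2 PySem.List.sorted
  have hbe : (fun a b : Int × Int => decide (a.2 < b.2) || !decide (b.2 < a.2) && decide (a.1 < b.1))
      = (fun a b : Int × Int => decide (pvKey a < pvKey b)) := by
    funext a b
    have hiff : (a.2 < b.2 ∨ ¬ b.2 < a.2 ∧ a.1 < b.1) ↔ pvKey a < pvKey b := by
      rw [pvKey, pvKey, Prod.Lex.lt_iff]
      dsimp only [ofLex_toLex]
      omega
    have hd : decide (pvKey a < pvKey b) = decide (a.2 < b.2 ∨ ¬ b.2 < a.2 ∧ a.1 < b.1) := by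
      simp only [decide_eq_decide]
      exact hiff.symm
    rw [hd]
    by_cases h1 : a.2 < b.2 <;> by_cases h2 : b.2 < a.2 <;> by_cases h3 : a.1 < b.1 <;>
      simp [h1, h2, h3]
  simp [hbe]

theorem pvKey_injective : Function.Injective pvKey := by
  intro a b hab
  rw [pvKey, pvKey] at hab
  have := congrArg ofLex hab
  simp at this
  exact Prod.ext this.2 this.1

theorem pvSkip_eq_drop (xs : List (Int × Int)) (k : Nat) (h : k ≤ xs.length) :
    pvSkip xs k = some (xs.drop k) := by
  induction xs generalizing k with
  | nil =>
    cases k with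
    | zero => rfl
    | succ k => simp at h
  | cons a t ih =>
    cases k with
    | zero => rfl
    | succ k =>
      simp only [List.length_cons] at h
      simpa [pvSkip] using ih k (by omega)

-- ===== VERDICT (by name: the statement is the Claim_ definition above) =====
theorem nth_lowest_selling_spec : Claim_equal_nth_lowest_selling := by
  intro sales n hdom hpre
  unfold Spec_nth_lowest_selling
  obtain ⟨hne, hnm⟩ := hpre
  simp only [nth_lowest_selling, nth_lowest_selling_alt]
  rw [sorted2_eq_sorted]
  set items := (PySem.Dict.counter sales).items with hitems
  set C := PySem.List.sorted items pvKey with hC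
  set S := C.map (fun kv => (kv.2, kv.1)) with hS
  set k := (n - 1).toNat with hk
  -- lengths
  have hlen_items : items.length = (PySem.Set.ofList sales).length := by
    rw [hitems, PySem.Dict.items_counter]; simp
  have hm1 : 1 ≤ (PySem.Set.ofList sales).length := by
    rcases sales with _ | ⟨a, t⟩
    · exact absurd rfl hne
    · have ha : a ∈ PySem.Set.ofList (a :: t) := by
        rw [PySem.Set.mem_ofList]; exact List.mem_cons_self
      have := List.length_pos_of_ne_nil (List.ne_nil_of_mem ha)
      omega
  have hkm : k < items.length := by rw [hlen_items]; omega
  have hlenC : C.length = items.length := by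
    rw [hC]; simp [PySem.List.length_sorted]
  have hlenS : S.length = C.length := by simp [hS]
  -- distinctness and order of the sorted list
  have hkeys : (items.map (fun kv => kv.1)).Nodup := by
    have hh := PySem.Dict.nodup_keys_counter sales
    simpa [PySem.Dict.keys, hitems] using hh
  have hitems_nd : items.Nodup := hkeys.of_map
  have hC_perm : C.Perm items := by rw [hC]; exact PySem.List.sorted_perm items pvKey false
  have hC_nd : C.Nodup := (hC_perm.nodup_iff).2 hitems_nd
  have hC_le : C.Pairwise (fun a b => pvKey a ≤ pvKey b) := by
    rw [hC]; exact PySem.List.sorted_pairwise items pvKey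
  have hC_lt : C.Pairwise (fun a b => pvKey a < pvKey b) := by
    have hand := hC_le.and hC_nd
    exact hand.imp (fun hab => lt_of_le_of_ne hab.1 (fun he => hab.2 (pvKey_injective he)))
  have hS_pair : S.Pairwise (fun a b => pvLt a b = true) := by
    rw [hS, List.pairwise_map]
    refine hC_lt.imp ?_
    intro a b hab
    rw [pvKey, pvKey, Prod.Lex.lt_iff] at hab
    dsimp only [ofLex_toLex] at hab
    simp only [pvLt, Bool.or_eq_true, Bool.and_eq_true, decide_eq_true_eq, beq_iff_eq]
    omega
  -- the heap built by A
  have hHeap0 : IsHeap [] := by intro i hi0 hil; simp at hil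
  obtain ⟨hbh, hbp⟩ := pvBuild_spec items [] hHeap0
  have hheapS : (items.foldl (fun acc p => pvHeappush acc (p.2, p.1)) []).Perm S := by
    refine hbp.trans ?_
    simp only [List.nil_append]
    rw [hS]
    exact (hC_perm.map _).symm
  obtain ⟨hfin, heq, hfp, hfh⟩ := pvPopLoop_spec k S _ hheapS hbh hS_pair
    (by rw [hlenS, hlenC]; omega)
  have hkS : k < S.length := by rw [hlenS, hlenC]; omega
  have hdropk : S.drop k = S[k] :: S.drop (k+1) := List.drop_eq_getElem_cons hkS
  rcases hfin with _ | ⟨r, t⟩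
  · exfalso
    have := hfp.length_eq
    simp [List.length_drop] at this
    omega
  have hroot : r = S[k] := by
    refine pvMin_head_eq (hfp.trans (by rw [hdropk])) ?_ ?_
    · intro y hy
      have hm := pvRoot_min_mem hfh y hy
      simpa using hm
    · intro y hy
      have hdp : (S.drop k).Pairwise (fun a b => pvLt a b = true) :=
        hS_pair.sublist (List.drop_sublist _ _)
      rw [hdropk] at hdp
      exact (List.pairwise_cons.1 hdp).1 y hy
  -- evaluate A's result
  rw [heq]
  dsimp only
  have hA : PySem.List.pyGet? (r :: t) (0 : Int) = some r := by
    simp [PySem.List.pyGet?, PySem.List.pyIdx?]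
  -- evaluate B's iterator: skipping k of the sorted list leaves C.drop k
  have hkC : k < C.length := by rw [hlenC]; exact hkm
  have hB : pvSkip C k = some (C.drop k) := pvSkip_eq_drop C k (by omega)
  rw [hA, hB]
  dsimp only
  have hhead : (C.drop k).head? = some C[k] := by
    rw [List.head?_drop, List.getElem?_eq_getElem hkC]
  rw [hhead]
  simp only [Option.map_some, Option.getD_some]
  rw [hroot]
  simp only [hS, List.getElem_map]
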